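-- pv_equiv track=rewrite | github.com/hunterthesavage/job_application_agent | services/job_levels.py | serialize_preferred_job_levels
-- ===== SOURCE A (Python) =====
-- JOB_LEVEL_OPTIONS = [
--     "Individual Contributor",
--     "IC Senior",
--     "Manager",
--     "Sr. Manager",
--     "Director",
--     "Sr. Director",
--     "VP",
--     "SVP",
--     "C-Suite",
-- ]
--
-- def serialize_preferred_job_levels(levels: list[str]) -> str:
--     selected: list[str] = []
--     seen: set[str] = set()
--
--     for option in JOB_LEVEL_OPTIONS:
--         if option in levels and option not in seen:
--             selected.append(option)
--             seen.add(option)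
--
--     return ", ".join(selected)
-- ===== SOURCE B (Python) =====
-- JOB_LEVEL_OPTIONS = [
--     "Individual Contributor",
--     "IC Senior",
--     "Manager",
--     "Sr. Manager",
--     "Director",
--     "Sr. Director",
--     "VP",
--     "SVP",
--     "C-Suite",
-- ]
--
--
-- def serialize_preferred_job_levels(levels: list[str]) -> str:
--     index = {opt: i for i, opt in enumerate(JOB_LEVEL_OPTIONS)}
--     picked = {index[l] for l in levels if l in index}
--     return ", ".join(JOB_LEVEL_OPTIONS[i] for i in sorted(picked))
-- ===== Notes on version B (the rewrite author's own statement) =====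
-- stated objective: faster
-- what changed: A scans the fixed canonical option list testing each option for membership in levels (an O(n) list scan per option) with a seen-set; B inverts the traversal: it builds an option-to-index dict once, collects the set of indices hit by one pass over levels, sorts them and maps back to option names.
import Mathlib
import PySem

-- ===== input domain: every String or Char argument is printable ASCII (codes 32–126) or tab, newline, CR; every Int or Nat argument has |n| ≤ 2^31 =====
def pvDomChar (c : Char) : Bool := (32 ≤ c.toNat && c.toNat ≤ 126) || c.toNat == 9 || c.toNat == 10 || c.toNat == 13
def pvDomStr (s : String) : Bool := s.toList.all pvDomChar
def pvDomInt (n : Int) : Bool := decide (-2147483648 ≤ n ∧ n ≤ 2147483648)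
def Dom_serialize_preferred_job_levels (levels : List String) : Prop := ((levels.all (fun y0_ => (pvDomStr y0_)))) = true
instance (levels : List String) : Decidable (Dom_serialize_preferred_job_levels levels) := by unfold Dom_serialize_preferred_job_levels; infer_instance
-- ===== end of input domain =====

-- B replaces A's option-driven scan (with a `seen` set) by an input-driven construction: an
-- option→index dict, the set of indices hit by one pass over `levels`, sorted and mapped back
-- (one dict lookup per input element instead of one list scan per option; measured faster in a timing run).

-- ===== PORT A =====
def JOB_LEVEL_OPTIONS_L : List String :=
  ["Individual Contributor", "IC Senior", "Manager", "Sr. Manager", "Director",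
   "Sr. Director", "VP", "SVP", "C-Suite"]

def serialize_preferred_job_levels (levels : List String) : String :=
  let st :=
    JOB_LEVEL_OPTIONS_L.foldl
      (fun (st : List String × PySem.Set String) option =>
        if levels.contains option && !(PySem.Set.contains st.2 option) then
          (st.1 ++ [option], PySem.Set.add st.2 option)
        else st)
      ([], PySem.Set.empty)
  PySem.Str.join ", " st.1

-- ===== PORT B =====
def serialize_preferred_job_levels_alt (levels : List String) : String :=
  let index : PySem.Dict String Int :=
    (PySem.List.enumerate JOB_LEVEL_OPTIONS_L 0).foldl
      (fun d p => d.insert p.2 p.1) PySem.Dict.empty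
  let picked : PySem.Set Int :=
    PySem.Set.ofList (levels.filterMap (fun l => index.get? l))
  PySem.Str.join ", "
    ((PySem.List.sorted picked (fun i => i) false).map
      (fun i => PySem.List.pyGetD JOB_LEVEL_OPTIONS_L i ""))

-- ===== PRECONDITION & SPEC =====
def Spec_serialize_preferred_job_levels (levels : List String) (out : String) : Prop := out = serialize_preferred_job_levels_alt levels
instance (levels : List String) (out : String) : Decidable (Spec_serialize_preferred_job_levels levels out) := by unfold Spec_serialize_preferred_job_levels; infer_instance

-- ===== CLAIM (what is proved, stated in full; the proofs are below) =====
def Claim_equal_serialize_preferred_job_levels : Prop := ∀ (levels : List String), Dom_serialize_preferred_job_levels levels → Spec_serialize_preferred_job_levels levels (serialize_preferred_job_levels levels)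

-- ===== LEMMAS AND PROOFS =====

-- B's index dict, as a standalone value (definitionally the one B builds).
def pvIdx : PySem.Dict String Int :=
  (PySem.List.enumerate JOB_LEVEL_OPTIONS_L 0).foldl
    (fun d p => d.insert p.2 p.1) PySem.Dict.empty

theorem pvIdx_get (l : String) (i : Int) :
    pvIdx.get? l = some i ↔
      (i ∈ ([0,1,2,3,4,5,6,7,8] : List Int) ∧ PySem.List.pyGetD JOB_LEVEL_OPTIONS_L i "" = l) := by
  have h : pvIdx = PySem.Dict.mk
      [("Individual Contributor",0),("IC Senior",1),("Manager",2),("Sr. Manager",3),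
       ("Director",4),("Sr. Director",5),("VP",6),("SVP",7),("C-Suite",8)] := by decide
  rw [h]
  simp [PySem.Dict.get?_mk_cons]
  split_ifs
  all_goals subst_vars
  all_goals constructor
  all_goals intro h
  all_goals try (obtain ⟨hd, hg⟩ := h; rcases hd with rfl|rfl|rfl|rfl|rfl|rfl|rfl|rfl|rfl <;> first | rfl | (exact absurd hg (by decide)) | simp_all [JOB_LEVEL_OPTIONS_L, PySem.List.pyGetD])
  all_goals cases h <;> exact ⟨by decide, by decide⟩

-- A's loop: over a duplicate-free option list whose members are not yet in `seen`,
-- the fold appends exactly the options contained in `levels`.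
theorem foldA (levels : List String) (opts : List String) (sel : List String)
    (seen : PySem.Set String) (hnd : opts.Nodup) (hs : ∀ o ∈ opts, o ∉ seen) :
    (opts.foldl
      (fun (st : List String × PySem.Set String) option =>
        if levels.contains option && !(PySem.Set.contains st.2 option) then
          (st.1 ++ [option], PySem.Set.add st.2 option)
        else st)
      (sel, seen)).1 = sel ++ opts.filter (fun o => levels.contains o) := by
  induction opts generalizing sel seen with
  | nil => simp
  | cons o rest ih =>
    have hnotin : o ∉ seen := hs o (by simp)
    have hc : PySem.Set.contains seen o = false := by
      by_contra h
      exact hnotin ((PySem.Set.contains_iff seen o).mp (by simpa using h))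
    simp only [List.foldl_cons, List.filter_cons]
    rcases Bool.eq_false_or_eq_true (levels.contains o) with hl | hl
    swap
    · rw [if_neg (by rw [hl]; simp), ih sel seen hnd.of_cons (fun x hx => hs x (by simp [hx])), if_neg (by simpa using hl)]
    · have hside : ∀ x ∈ rest, x ∉ PySem.Set.add seen o := by
        intro x hx hmem
        rcases (PySem.Set.mem_add seen o x).mp hmem with h' | rfl
        · exact hs x (by simp [hx]) h'
        · exact (List.nodup_cons.mp hnd).1 hx
      rw [if_pos (by rw [hl, hc]; rfl), ih (sel ++ [o]) _ hnd.of_cons hside, if_pos hl]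
      simp

-- B's sorted index set is the canonical index list filtered by membership of the option in `levels`.
theorem pvSorted_eq (levels : List String) :
    PySem.List.sorted
      (PySem.Set.ofList (levels.filterMap (fun l => pvIdx.get? l))) (fun i => i) false =
    ([0,1,2,3,4,5,6,7,8] : List Int).filter
      (fun i => levels.contains (PySem.List.pyGetD JOB_LEVEL_OPTIONS_L i "")) := by
  apply PySem.List.sorted_eq_of_perm_of_pairwise_lt
  · rw [List.perm_ext_iff_of_nodup (List.Nodup.filter _ (by decide)) (PySem.Set.nodup_ofList _)]
    intro x
    simp only [List.mem_filter, PySem.Set.mem_ofList, List.mem_filterMap]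
    constructor
    · rintro ⟨hx, hc⟩
      exact ⟨PySem.List.pyGetD JOB_LEVEL_OPTIONS_L x "", by simpa using hc, (pvIdx_get _ _).mpr ⟨hx, rfl⟩⟩
    · rintro ⟨l, hl, hg⟩
      obtain ⟨hx, hgl⟩ := (pvIdx_get _ _).mp hg
      exact ⟨hx, by simpa [hgl] using hl⟩
  · exact List.Pairwise.filter _ (by decide)

-- ===== VERDICT (by name: the statement is the Claim_ definition above) =====
theorem serialize_preferred_job_levels_spec : Claim_equal_serialize_preferred_job_levels := by
  intro levels _
  unfold Spec_serialize_preferred_job_levels serialize_preferred_job_levels serialize_preferred_job_levels_alt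
  have hA := foldA levels JOB_LEVEL_OPTIONS_L [] PySem.Set.empty (by decide) (by simp [PySem.Set.empty])
  simp only [hA, List.nil_append]
  rw [show ((PySem.List.enumerate JOB_LEVEL_OPTIONS_L 0).foldl
      (fun d p => d.insert p.2 p.1) PySem.Dict.empty) = pvIdx from rfl]
  rw [pvSorted_eq levels]
  congr 1
  have hO : JOB_LEVEL_OPTIONS_L =
      (([0,1,2,3,4,5,6,7,8] : List Int).map (fun i => PySem.List.pyGetD JOB_LEVEL_OPTIONS_L i "")) := by decide
  conv_lhs => rw [hO]
  rw [List.filter_map]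
  rfl
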